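-- pv_equiv track=rewrite | github.com/xiaochuany/etudes | 2023-12/2023-12-31-1624.py | max_word
-- ===== SOURCE A (Python) =====
-- from collections import defaultdict
--
-- def max_word(s: str) -> int:
--     """compute the longest word length between equal characters, return -1 if non existing"""
--     res = -1
--     dd = defaultdict(list)
--     for i,c in enumerate(s):
--         dd[c].append(i)
--     for v in dd.values():
--         max_diff = max(v)-min(v)-1
--         res = max(res, max_diff)
--     return res
-- ===== SOURCE B (Python) =====
-- def max_word(s: str) -> int:
--     """compute the longest word length between equal characters, return -1 if non existing"""
--     res = -1
--     first = {}
--     for i, c in enumerate(s):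
--         if c in first:
--             res = max(res, i - first[c] - 1)
--         else:
--             first[c] = i
--     return res
-- ===== Notes on version B (the rewrite author's own statement) =====
-- stated objective: simpler
-- what changed: Replaces A's two passes (group every index of each character into per-character lists, then scan the groups for max-min-1) with a single pass that keeps only each character's first index and updates the running maximum of i - first[c] - 1 in place.
import Mathlib
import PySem

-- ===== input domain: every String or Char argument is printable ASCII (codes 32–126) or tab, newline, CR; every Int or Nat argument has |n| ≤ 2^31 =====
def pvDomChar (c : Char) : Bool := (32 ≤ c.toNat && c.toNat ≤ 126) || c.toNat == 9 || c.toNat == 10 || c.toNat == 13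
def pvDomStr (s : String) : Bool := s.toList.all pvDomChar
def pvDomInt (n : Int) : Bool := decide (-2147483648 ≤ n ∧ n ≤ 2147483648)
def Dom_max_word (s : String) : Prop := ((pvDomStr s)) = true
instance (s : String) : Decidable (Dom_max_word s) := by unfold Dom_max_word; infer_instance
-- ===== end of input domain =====

-- B replaces A's two passes (group all indices per character, then scan the groups
-- for max-min-1) by a single pass that keeps only each character's first index.

-- ===== PORT A =====
-- Python's max(v)/min(v) raise on an empty list; every value list the grouping loop
-- builds is nonempty, so '.getD 0' is exact here.
def max_word (s : String) : Int :=
  let dd := (PySem.List.enumerate s.toList 0).foldl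
      (fun d (p : Int × Char) => d.modify p.2 [] (fun v => v ++ [p.1])) PySem.Dict.empty
  dd.values.foldl
    (fun res v =>
      max res ((PySem.List.max? v (fun x => x)).getD 0 - (PySem.List.min? v (fun x => x)).getD 0 - 1))
    (-1)

-- ===== PORT B =====
def max_word_alt (s : String) : Int :=
  ((PySem.List.enumerate s.toList 0).foldl
    (fun (st : PySem.Dict Char Int × Int) (p : Int × Char) =>
      if st.1.contains p.2 then (st.1, max st.2 (p.1 - st.1.getD p.2 0 - 1))
      else (st.1.insert p.2 p.1, st.2))
    (PySem.Dict.empty, -1)).2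

-- ===== PRECONDITION & SPEC =====
def Spec_max_word (s : String) (out : Int) : Prop := out = max_word_alt s
instance (s : String) (out : Int) : Decidable (Spec_max_word s out) := by unfold Spec_max_word; infer_instance

-- ===== CLAIM (what is proved, stated in full; the proofs are below) =====
def Claim_equal_max_word : Prop := ∀ (s : String), Dom_max_word s → Spec_max_word s (max_word s)

-- ===== LEMMAS AND PROOFS =====

-- Proof-side names for the two folds (definitionally equal to the ports' bodies).
def pvBuildA (cs : List Char) : PySem.Dict Char (List Int) :=
  (PySem.List.enumerate cs 0).foldl
    (fun d (p : Int × Char) => d.modify p.2 [] (fun v => v ++ [p.1])) PySem.Dict.empty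

def pvFA (v : List Int) : Int :=
  (PySem.List.max? v (fun x => x)).getD 0 - (PySem.List.min? v (fun x => x)).getD 0 - 1

def pvFinish (d : PySem.Dict Char (List Int)) : Int :=
  d.values.foldl (fun res v => max res (pvFA v)) (-1)

def pvStB (cs : List Char) : PySem.Dict Char Int × Int :=
  (PySem.List.enumerate cs 0).foldl
    (fun (st : PySem.Dict Char Int × Int) (p : Int × Char) =>
      if st.1.contains p.2 then (st.1, max st.2 (p.1 - st.1.getD p.2 0 - 1))
      else (st.1.insert p.2 p.1, st.2))
    (PySem.Dict.empty, -1)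

lemma max_word_eq (s : String) : max_word s = pvFinish (pvBuildA s.toList) := rfl
lemma max_word_alt_eq (s : String) : max_word_alt s = (pvStB s.toList).2 := rfl

lemma pvBuildA_snoc (cs : List Char) (c : Char) :
    pvBuildA (cs ++ [c]) =
      (pvBuildA cs).insert c ((pvBuildA cs).getD c [] ++ [(cs.length : Int)]) := by
  simp [pvBuildA, PySem.List.enumerate_append, List.foldl_append, PySem.List.enumerate_cons,
    PySem.List.enumerate_nil]
  rfl

lemma pvStB_snoc (cs : List Char) (c : Char) :
    pvStB (cs ++ [c]) =
      (if (pvStB cs).1.contains c then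
        ((pvStB cs).1, max (pvStB cs).2 ((cs.length : Int) - (pvStB cs).1.getD c 0 - 1))
      else ((pvStB cs).1.insert c (cs.length : Int), (pvStB cs).2)) := by
  simp [pvStB, PySem.List.enumerate_append, List.foldl_append, PySem.List.enumerate_cons,
    PySem.List.enumerate_nil]

lemma pvFinish_ge (d : PySem.Dict Char (List Int)) : -1 ≤ pvFinish d :=
  (PySem.List.le_foldl_max_int d.values pvFA (-1)).1

lemma pvFoldl_max_pull (K : List Char) (f : Char → Int) (a x : Int) :
    K.foldl (fun r c => max r (f c)) (max a x) =
      max (K.foldl (fun r c => max r (f c)) a) x := by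
  induction K generalizing a with
  | nil => rfl
  | cons c K ih =>
    simp only [List.foldl_cons]
    rw [max_right_comm, ih]

lemma pvFoldl_max_update (K : List Char) (f f' : Char → Int) (c : Char)
    (hc : c ∈ K) (hnd : K.Nodup)
    (hag : ∀ c' ∈ K, c' ≠ c → f' c' = f c') (hle : f c ≤ f' c) :
    K.foldl (fun r x => max r (f' x)) (-1) =
      max (K.foldl (fun r x => max r (f x)) (-1)) (f' c) := by
  obtain ⟨K1, K2, rfl⟩ := List.append_of_mem hc
  have hnd' := hnd
  rw [List.nodup_append] at hnd'
  have hc1 : c ∉ K1 := fun h => hnd'.2.2 c h c (by simp) rfl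
  have hc2 : c ∉ K2 := fun h => (List.nodup_cons.mp hnd'.2.1).1 h
  have hcong1 : K1.foldl (fun r x => max r (f' x)) (-1) = K1.foldl (fun r x => max r (f x)) (-1) := by
    apply PySem.List.foldl_congr_mem
    intro acc x hx
    rw [hag x (by simp [hx]) (fun h => hc1 (h ▸ hx))]
  have hcong2 : ∀ a : Int, K2.foldl (fun r x => max r (f' x)) a = K2.foldl (fun r x => max r (f x)) a := by
    intro a
    apply PySem.List.foldl_congr_mem
    intro acc x hx
    rw [hag x (by simp [hx]) (fun h => hc2 (h ▸ hx))]
  simp only [List.foldl_append, List.foldl_cons]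
  rw [hcong1, hcong2, pvFoldl_max_pull, pvFoldl_max_pull]
  have h1 : f c ≤ f' c := hle
  omega

lemma pvFA_singleton (n : Int) : pvFA [n] = -1 := by
  simp [pvFA, PySem.List.max?_id_cons, PySem.List.min?_id_cons]

lemma pvMax_snoc (h : Int) (t : List Int) (n : Int)
    (hb : ∀ x ∈ h :: t, x < n) :
    PySem.List.max? (h :: (t ++ [n])) (fun x => x) = some n := by
  rw [PySem.List.max?_id_cons, List.foldl_append]
  have := PySem.List.foldl_max_mem t h
  have hle : List.foldl max h t ≤ n := by
    rcases this with h1 | h1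
    · rw [h1]; exact le_of_lt (hb h (by simp))
    · exact le_of_lt (hb _ (by simp [h1]))
  simp [max_eq_right hle]

lemma pvMin_eq_head (h : Int) (t : List Int) (hp : (h :: t).Pairwise (· < ·)) :
    List.foldl min h t = h := by
  have hmem := PySem.List.foldl_min_mem t h
  have hle := (PySem.List.foldl_min_le t h).1
  rcases hmem with h1 | h1
  · exact h1
  · have : h < List.foldl min h t := (List.pairwise_cons.mp hp).1 _ h1
    omega

lemma pvMin_snoc (h : Int) (t : List Int) (n : Int)
    (hp : (h :: t).Pairwise (· < ·)) (hb : ∀ x ∈ h :: t, x < n) :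
    PySem.List.min? (h :: (t ++ [n])) (fun x => x) = some h := by
  rw [PySem.List.min?_id_cons, List.foldl_append]
  rw [pvMin_eq_head h t hp]
  simp [min_eq_left (le_of_lt (hb h (by simp)))]

lemma pvFA_snoc (v : List Int) (n : Int) (hv : v ≠ [])
    (hp : v.Pairwise (· < ·)) (hb : ∀ x ∈ v, x < n) :
    pvFA (v ++ [n]) = n - v.headI - 1 := by
  obtain ⟨h, t, rfl⟩ := List.exists_cons_of_ne_nil hv
  rw [pvFA, List.cons_append, pvMax_snoc h t n hb, pvMin_snoc h t n hp hb]
  rfl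

lemma pvFA_le (v : List Int) (n : Int) (hv : v ≠ [])
    (hp : v.Pairwise (· < ·)) (hb : ∀ x ∈ v, x < n) :
    pvFA v ≤ n - v.headI - 1 := by
  obtain ⟨h, t, rfl⟩ := List.exists_cons_of_ne_nil hv
  rw [pvFA, PySem.List.max?_id_cons, PySem.List.min?_id_cons, pvMin_eq_head h t hp]
  have hmem := PySem.List.foldl_max_mem t h
  have : List.foldl max h t < n := by
    rcases hmem with h1 | h1
    · rw [h1]; exact hb h (by simp)
    · exact hb _ (by simp [h1])
  simp only [Option.getD_some, List.headI]
  omega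

-- The inductive invariant tying A's grouped dict to B's (first-index dict, running max).
def pvInv (cs : List Char) : Prop :=
  (pvStB cs).2 = pvFinish (pvBuildA cs)
  ∧ (pvBuildA cs).keys.Nodup
  ∧ (∀ c, (pvStB cs).1.contains c = (pvBuildA cs).contains c)
  ∧ (∀ c, (pvBuildA cs).contains c = true →
      (pvBuildA cs).getD c [] ≠ []
      ∧ ((pvBuildA cs).getD c []).Pairwise (· < ·)
      ∧ (∀ x ∈ (pvBuildA cs).getD c [], 0 ≤ x ∧ x < (cs.length : Int))
      ∧ (pvStB cs).1.getD c 0 = ((pvBuildA cs).getD c []).headI)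

lemma pvFinish_keys (d : PySem.Dict Char (List Int)) (hnd : d.keys.Nodup) :
    pvFinish d = d.keys.foldl (fun r c => max r (pvFA (d.getD c []))) (-1) := by
  rw [pvFinish, PySem.Dict.values_eq_map_keys d hnd [], List.foldl_map]

lemma pvInv_holds (cs : List Char) : pvInv cs := by
  induction cs using List.reverseRecOn with
  | nil =>
    refine ⟨rfl, PySem.Dict.nodup_keys_empty, fun c => rfl, fun c hc => ?_⟩
    simp [pvBuildA, PySem.List.enumerate_nil, PySem.Dict.contains_empty] at hc
  | append_singleton cs ch ih =>
    obtain ⟨ihres, ihnd, ihcont, ihval⟩ := ih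
    have hn0 : (0 : Int) ≤ (cs.length : Int) := by positivity
    have hlen : (((cs ++ [ch]).length : Nat) : Int) = (cs.length : Int) + 1 := by simp
    by_cases hc : (pvBuildA cs).contains ch = true
    · -- ch already seen: A replaces its group v by v ++ [n]; B updates the running max
      obtain ⟨hne, hp, hb, hhd⟩ := ihval ch hc
      have hblt : ∀ x ∈ (pvBuildA cs).getD ch [], x < (cs.length : Int) := fun x hx => (hb x hx).2
      have hbA : pvBuildA (cs ++ [ch]) =
          (pvBuildA cs).insert ch ((pvBuildA cs).getD ch [] ++ [(cs.length : Int)]) :=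
        pvBuildA_snoc cs ch
      have hkeys : ((pvBuildA cs).insert ch ((pvBuildA cs).getD ch [] ++ [(cs.length : Int)])).keys
          = (pvBuildA cs).keys := PySem.Dict.keys_insert_of_contains _ _ hc
      have hmem : ch ∈ (pvBuildA cs).keys := (PySem.Dict.contains_iff_mem_keys _ ch).mp hc
      have hX : ((pvBuildA cs).insert ch ((pvBuildA cs).getD ch [] ++ [(cs.length : Int)])).getD ch []
          = (pvBuildA cs).getD ch [] ++ [(cs.length : Int)] := by
        rw [PySem.Dict.getD_insert, if_pos rfl]
      have hfin : pvFinish ((pvBuildA cs).insert ch ((pvBuildA cs).getD ch [] ++ [(cs.length : Int)]))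
          = max (pvFinish (pvBuildA cs)) ((cs.length : Int) - ((pvBuildA cs).getD ch []).headI - 1) := by
        rw [pvFinish_keys _ (hkeys ▸ ihnd), hkeys, pvFinish_keys _ ihnd]
        have hupd := pvFoldl_max_update (pvBuildA cs).keys
          (fun c => pvFA ((pvBuildA cs).getD c []))
          (fun c => pvFA (((pvBuildA cs).insert ch ((pvBuildA cs).getD ch [] ++ [(cs.length : Int)])).getD c []))
          ch hmem ihnd
          (by
            intro c' _ hne'
            simp only [PySem.Dict.getD_insert, if_neg hne'])
          (by
            simp only [hX]
            rw [pvFA_snoc _ _ hne hp hblt]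
            exact pvFA_le _ _ hne hp hblt)
        simp only [hupd, hX, pvFA_snoc _ _ hne hp hblt]
      have hB : pvStB (cs ++ [ch]) = ((pvStB cs).1,
          max (pvStB cs).2 ((cs.length : Int) - (pvStB cs).1.getD ch 0 - 1)) := by
        rw [pvStB_snoc, if_pos (by rw [ihcont]; exact hc)]
      refine ⟨?_, ?_, ?_, ?_⟩
      · rw [hB, hbA, hfin, ihres, hhd]
      · rw [hbA, hkeys]; exact ihnd
      · intro c
        rw [hB, hbA, PySem.Dict.contains_insert]
        by_cases h : c = ch
        · subst h; simp [ihcont, hc]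
        · simp [h, ihcont]
      · intro c hcc
        rw [hB, hbA, PySem.Dict.getD_insert]
        by_cases h : c = ch
        · subst h
          rw [if_pos rfl]
          obtain ⟨h0, t0, hvv⟩ := List.exists_cons_of_ne_nil hne
          refine ⟨by simp, ?_, ?_, ?_⟩
          · rw [List.pairwise_append]
            exact ⟨hp, by simp, by simpa using hblt⟩
          · intro x hx
            rcases List.mem_append.mp hx with h1 | h1
            · exact ⟨(hb x h1).1, by have := (hb x h1).2; omega⟩
            · simp at h1; subst h1; constructor <;> omega
          · rw [hhd, hvv]; rfl
        · rw [if_neg h]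
          rw [hbA, PySem.Dict.contains_insert] at hcc
          simp [h] at hcc
          obtain ⟨a1, a2, a3, a4⟩ := ihval c hcc
          exact ⟨a1, a2, fun x hx => ⟨(a3 x hx).1, by have := (a3 x hx).2; omega⟩, a4⟩
    · -- first occurrence of ch: A starts the group [n]; B records the first index
      have hc' : (pvBuildA cs).contains ch = false := by simpa using hc
      have hgD : (pvBuildA cs).getD ch [] = [] := PySem.Dict.getD_of_not_contains _ [] hc'
      have hbA : pvBuildA (cs ++ [ch]) = (pvBuildA cs).insert ch [(cs.length : Int)] := by
        rw [pvBuildA_snoc cs ch, hgD]; rfl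
      have hkeys : ((pvBuildA cs).insert ch [(cs.length : Int)]).keys
          = (pvBuildA cs).keys ++ [ch] := PySem.Dict.keys_insert_of_not_contains _ _ hc'
      have hnmem : ch ∉ (pvBuildA cs).keys := by
        intro h
        rw [(PySem.Dict.contains_iff_mem_keys _ ch).mpr h] at hc'
        exact absurd hc' (by simp)
      have hnd' : ((pvBuildA cs).insert ch [(cs.length : Int)]).keys.Nodup := by
        rw [hkeys, List.nodup_append]
        refine ⟨ihnd, List.nodup_singleton _, ?_⟩
        -- disjointness of the old keys and the fresh key
        intro a ha b hb hab
        exact hnmem ((hab.trans (List.mem_singleton.mp hb)) ▸ ha)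
      have hfin : pvFinish ((pvBuildA cs).insert ch [(cs.length : Int)]) = pvFinish (pvBuildA cs) := by
        rw [pvFinish_keys _ hnd', hkeys, List.foldl_append, List.foldl_cons, List.foldl_nil]
        have hcong : (pvBuildA cs).keys.foldl
              (fun r c => max r (pvFA (((pvBuildA cs).insert ch [(cs.length : Int)]).getD c []))) (-1)
            = (pvBuildA cs).keys.foldl (fun r c => max r (pvFA ((pvBuildA cs).getD c []))) (-1) := by
          apply PySem.List.foldl_congr_mem
          intro acc x hx
          have hxne : x ≠ ch := fun hxy => hnmem (hxy ▸ hx)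
          rw [PySem.Dict.getD_insert, if_neg hxne]
        rw [hcong, ← pvFinish_keys _ ihnd, PySem.Dict.getD_insert, if_pos rfl, pvFA_singleton]
        exact max_eq_left (pvFinish_ge _)
      have hB : pvStB (cs ++ [ch]) = ((pvStB cs).1.insert ch (cs.length : Int), (pvStB cs).2) := by
        rw [pvStB_snoc, if_neg (by rw [ihcont, hc']; simp)]
      refine ⟨?_, ?_, ?_, ?_⟩
      · rw [hB, hbA, hfin]; exact ihres
      · rw [hbA]; exact hnd'
      · intro c
        rw [hB, hbA, PySem.Dict.contains_insert, PySem.Dict.contains_insert, ihcont]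
      · intro c hcc
        rw [hB, hbA, PySem.Dict.getD_insert, PySem.Dict.getD_insert]
        by_cases h : c = ch
        · subst h
          rw [if_pos rfl, if_pos rfl]
          refine ⟨by simp, by simp, ?_, rfl⟩
          intro x hx
          simp at hx
          subst hx
          constructor <;> omega
        · rw [if_neg h, if_neg h]
          rw [hbA, PySem.Dict.contains_insert] at hcc
          simp [h] at hcc
          obtain ⟨a1, a2, a3, a4⟩ := ihval c hcc
          exact ⟨a1, a2, fun x hx => ⟨(a3 x hx).1, by have := (a3 x hx).2; omega⟩, a4⟩

-- ===== VERDICT (by name: the statement is the Claim_ definition above) =====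
theorem max_word_spec : Claim_equal_max_word := by
  intro s _
  unfold Spec_max_word
  rw [max_word_eq, max_word_alt_eq]
  exact (pvInv_holds s.toList).1.symm
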